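-- pv_equiv track=rewrite | github.com/AcademySoftwareFoundation/OpenColorIO | share/sphinx/ExtractRstFromSourceCPP.py | getNextCommentLine
-- ===== SOURCE A (Python) =====
-- def getNextCommentLine(string, from_pos, buffer = ""):
--     end = from_pos
--     tmp = ""
--     while string[end] != "\n":
--         tmp += string[end]
--         end += 1
--     tmp += string[end]
--     if tmp.lstrip()[:2] == "//":
--         if tmp.lstrip()[2:][0] == " ":
--             buffer += tmp.lstrip()[3:]
--         else:
--             buffer += tmp.lstrip()[2:]
--         buffer, end = getNextCommentLine(string, end+1, buffer)
--     else:
--         end = from_pos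
--     return buffer, end
-- ===== SOURCE B (Python) =====
-- def getNextCommentLine(string, from_pos, buffer=""):
--     # Iterative rewrite: loop over lines, collect stripped comment bodies in a
--     # list and join once at the end (A recurses and concatenates strings).
--     pieces = [buffer]
--     pos = from_pos
--     while True:
--         nl = pos
--         while string[nl] != "\n":
--             nl += 1
--         stripped = "".join(string[i] for i in range(pos, nl + 1)).lstrip()
--         if stripped[:2] != "//":
--             return "".join(pieces), pos
--         pieces.append(stripped[3:] if stripped[2] == " " else stripped[2:])
--         pos = nl + 1
-- ===== Notes on version B (the rewrite author's own statement) =====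
-- stated objective: simpler
-- what changed: Replaced the recursive descent with a flat iterative loop over lines that first locates the newline index, rebuilds the line once, strips it once, and collects comment bodies in a list joined at the end, instead of A's recursion that accumulates characters into tmp and re-lstrips it three times per line.
import Mathlib
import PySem

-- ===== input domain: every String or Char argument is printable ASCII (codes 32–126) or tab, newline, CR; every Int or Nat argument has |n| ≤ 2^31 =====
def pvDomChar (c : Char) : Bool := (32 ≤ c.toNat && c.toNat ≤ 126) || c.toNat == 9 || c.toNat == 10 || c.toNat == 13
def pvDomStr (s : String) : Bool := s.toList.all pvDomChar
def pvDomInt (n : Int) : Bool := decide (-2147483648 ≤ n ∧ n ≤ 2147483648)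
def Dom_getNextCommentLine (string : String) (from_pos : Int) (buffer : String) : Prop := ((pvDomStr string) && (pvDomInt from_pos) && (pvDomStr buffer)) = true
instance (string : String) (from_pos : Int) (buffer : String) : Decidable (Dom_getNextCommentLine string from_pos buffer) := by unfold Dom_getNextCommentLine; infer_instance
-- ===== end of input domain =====

-- B replaces A's recursive descent by a flat iterative loop that joins collected
-- comment bodies once at the end (objective: simpler; same return value wherever A returns).

-- ===== PORT A =====
-- the char-by-char 'while string[end] != "\n"' loop, accumulating tmp (fuel makes it total;
-- fuel 2*len+2 always suffices to reach either the newline or the IndexError 'none')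
def pvScanA (s : List Char) (e : Int) (tmp : List Char) (fuel : Nat) : Option (List Char × Int) :=
  match fuel with
  | 0 => none
  | fuel + 1 =>
    match PySem.List.pyGet? s e with
    | none => none
    | some c => if c = '\n' then some (tmp ++ [c], e) else pvScanA s (e + 1) (tmp ++ [c]) fuel

-- A's recursion (fueled; 'none' = the Python raises IndexError)
def pvRunA (s : List Char) (from_pos : Int) (buffer : List Char) (fuel : Nat) : Option (List Char × Int) :=
  match fuel with
  | 0 => none
  | fuel + 1 =>
    match pvScanA s from_pos [] (2 * s.length + 2) with
    | none => none
    | some (tmp, e) =>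
      if (PySem.Chars.lstrip tmp).take 2 = ['/', '/'] then
        match PySem.List.pyGet? ((PySem.Chars.lstrip tmp).drop 2) 0 with
        | none => none
        | some c =>
          pvRunA s (e + 1)
            (if c = ' ' then buffer ++ (PySem.Chars.lstrip tmp).drop 3
             else buffer ++ (PySem.Chars.lstrip tmp).drop 2) fuel
      else some (buffer, from_pos)

def getNextCommentLine (string : String) (from_pos : Int) (buffer : String) : String × Int :=
  match pvRunA string.toList from_pos buffer.toList (2 * string.toList.length + 2) with
  | none => ("", 0)
  | some (b, e) => (String.ofList b, e)

-- ===== PORT B =====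
-- the inner 'while string[nl] != "\n": nl += 1' of B: only the newline index
def pvFindNl (s : List Char) (nl : Int) (fuel : Nat) : Option Int :=
  match fuel with
  | 0 => none
  | fuel + 1 =>
    match PySem.List.pyGet? s nl with
    | none => none
    | some c => if c = '\n' then some nl else pvFindNl s (nl + 1) fuel

-- '"".join(string[i] for i in range(pos, nl + 1))'
def pvLineB (s : List Char) (pos nl : Int) : List Char :=
  (PySem.List.pyRange pos (nl + 1) 1).filterMap (PySem.List.pyGet? s)

-- B's 'while True' loop, carrying the list of pieces
def pvRunB (s : List Char) (pos : Int) (pieces : List (List Char)) (fuel : Nat) : Option (List Char × Int) :=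
  match fuel with
  | 0 => none
  | fuel + 1 =>
    match pvFindNl s pos (2 * s.length + 2) with
    | none => none
    | some nl =>
      let stripped := PySem.Chars.lstrip (pvLineB s pos nl)
      if stripped.take 2 ≠ ['/', '/'] then some (PySem.Chars.join [] pieces, pos)
      else
        match PySem.List.pyGet? stripped 2 with
        | none => none
        | some c =>
          pvRunB s (nl + 1)
            (pieces ++ [if c = ' ' then stripped.drop 3 else stripped.drop 2]) fuel

def getNextCommentLine_alt (string : String) (from_pos : Int) (buffer : String) : String × Int :=
  match pvRunB string.toList from_pos [buffer.toList] (2 * string.toList.length + 2) with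
  | none => ("", 0)
  | some (b, e) => (String.ofList b, e)

-- ===== PRECONDITION & SPEC =====
def pvIsCommentPiece (p : List Char) : Bool := (PySem.Chars.lstrip p).take 2 == ['/', '/']

-- the text contains, among its newline-terminated lines, a non-comment one (A then stops there)
def pvReturnsFrom (t : List Char) : Bool :=
  ((PySem.Chars.splitOn t ['\n']).dropLast).any (fun p => !pvIsCommentPiece p)

-- Pre_ holds exactly where the Python A returns (elsewhere it raises IndexError, and so does B):
-- scanning forward from from_pos (a negative from_pos reads the tail s[len+from_pos:] and then,
-- by Python index wraparound, the whole string again) must meet a newline-terminated non-comment line.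
def Pre_getNextCommentLine (string : String) (from_pos : Int) (buffer : String) : Prop :=
  if from_pos < 0 then
    -(string.toList.length : Int) ≤ from_pos ∧
      pvReturnsFrom (string.toList.drop (string.toList.length + from_pos).toNat ++ string.toList) = true
  else pvReturnsFrom (string.toList.drop from_pos.toNat) = true

instance (string : String) (from_pos : Int) (buffer : String) : Decidable (Pre_getNextCommentLine string from_pos buffer) := by unfold Pre_getNextCommentLine; infer_instance

def pvWitness_getNextCommentLine : String × Int × String := ("// a\nx\n", 0, "")

def Spec_getNextCommentLine (string : String) (from_pos : Int) (buffer : String) (out : String × Int) : Prop := out = getNextCommentLine_alt string from_pos buffer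
instance (string : String) (from_pos : Int) (buffer : String) (out : String × Int) : Decidable (Spec_getNextCommentLine string from_pos buffer out) := by unfold Spec_getNextCommentLine; infer_instance

-- ===== CLAIM (what is proved, stated in full; the proofs are below) =====
def Claim_equal_getNextCommentLine : Prop := ∀ (string : String) (from_pos : Int) (buffer : String), Dom_getNextCommentLine string from_pos buffer → Pre_getNextCommentLine string from_pos buffer → Spec_getNextCommentLine string from_pos buffer (getNextCommentLine string from_pos buffer)

-- ===== LEMMAS AND PROOFS =====

-- the newline index found by B's inner loop never precedes the start
theorem pvFindNl_ge (s : List Char) : ∀ (fuel : Nat) (e nl : Int), pvFindNl s e fuel = some nl → e ≤ nl := by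
  intro fuel
  induction fuel with
  | zero => intro e nl h; simp [pvFindNl] at h
  | succ n ih =>
    intro e nl h
    unfold pvFindNl at h
    cases hg : PySem.List.pyGet? s e with
    | none => simp [hg] at h
    | some c =>
      simp [hg] at h
      by_cases hc : c = '\n'
      · simp [hc] at h; omega
      · simp [hc] at h; have := ih (e + 1) nl h; omega

theorem pvGet_drop2 (l : List Char) : PySem.List.pyGet? (l.drop 2) 0 = PySem.List.pyGet? l 2 := by
  have h2 : (2 : Int) = ((2 : Nat) : Int) := by norm_num
  rw [h2, PySem.List.pyGet?_natCast, PySem.List.pyGet?_zero]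
  simp [List.getElem?_drop]

-- A's char scan = B's newline search plus the one-shot line rebuild
theorem pvScanA_eq (s : List Char) : ∀ (fuel : Nat) (e : Int) (acc : List Char),
    pvScanA s e acc fuel = (pvFindNl s e fuel).map (fun nl => (acc ++ pvLineB s e nl, nl)) := by
  intro fuel
  induction fuel with
  | zero => intro e acc; simp [pvScanA, pvFindNl]
  | succ n ih =>
    intro e acc
    unfold pvScanA pvFindNl
    cases hg : PySem.List.pyGet? s e with
    | none => simp
    | some c =>
      by_cases hc : c = '\n'
      · simp [hc, pvLineB, PySem.List.pyRange_one_singleton, hg]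
      · simp only [hc, if_false]
        rw [ih]
        cases hf : pvFindNl s (e + 1) n with
        | none => simp
        | some nl =>
          have hle : e + 1 ≤ nl := pvFindNl_ge s n (e + 1) nl hf
          simp only [Option.map_some]
          have hline : pvLineB s e nl = c :: pvLineB s (e + 1) nl := by
            unfold pvLineB
            rw [PySem.List.pyRange_one_cons (by omega : e < nl + 1)]
            simp [hg]
          simp [hline]

-- joining with the empty separator is flattening
theorem pvJoin_eq_flatten : ∀ (ps : List (List Char)), PySem.Chars.join [] ps = ps.flatten := by
  intro ps
  induction ps with
  | nil => simp [PySem.Chars.join, List.intercalate]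
  | cons a ps ih =>
    cases ps with
    | nil => simp [PySem.Chars.join, List.intercalate]
    | cons b ps => rw [PySem.Chars.join_cons_cons, ih]; simp

-- joining one more piece appends it
theorem pvJoin_append (ps : List (List Char)) (x : List Char) :
    PySem.Chars.join [] (ps ++ [x]) = PySem.Chars.join [] ps ++ x := by
  simp [pvJoin_eq_flatten]

-- B's loop carrying pieces computes A's recursion carrying their join
theorem pvRunB_eq (s : List Char) : ∀ (fuel : Nat) (p : Int) (ps : List (List Char)),
    pvRunB s p ps fuel = pvRunA s p (PySem.Chars.join [] ps) fuel := by
  intro fuel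
  induction fuel with
  | zero => intro p ps; simp [pvRunA, pvRunB]
  | succ n ih =>
    intro p ps
    unfold pvRunA pvRunB
    rw [pvScanA_eq]
    cases hf : pvFindNl s p (2 * s.length + 2) with
    | none => simp
    | some nl =>
      simp only [Option.map_some, List.nil_append]
      by_cases hcm : (PySem.Chars.lstrip (pvLineB s p nl)).take 2 = ['/', '/']
      · simp only [hcm, if_pos, ne_eq, not_true_eq_false, if_false]
        rw [pvGet_drop2]
        cases hg : PySem.List.pyGet? (PySem.Chars.lstrip (pvLineB s p nl)) 2 with
        | none => simp
        | some c =>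
          simp only
          rw [ih, pvJoin_append]
          by_cases hc : c = ' ' <;> simp [hc]
      · simp [hcm]

theorem pvTop_eq (string : String) (from_pos : Int) (buffer : String) :
    getNextCommentLine string from_pos buffer = getNextCommentLine_alt string from_pos buffer := by
  unfold getNextCommentLine getNextCommentLine_alt
  rw [pvRunB_eq]
  have : PySem.Chars.join [] [buffer.toList] = buffer.toList := by simp
  rw [this]

-- ===== VERDICT (by name: the statement is the Claim_ definition above) =====
theorem getNextCommentLine_spec : Claim_equal_getNextCommentLine := by
  intro string from_pos buffer _ _
  unfold Spec_getNextCommentLine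
  exact pvTop_eq string from_pos buffer
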